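-- pv_equiv track=rewrite | github.com/HuwCheston/deep-pianist-identification | deep_pianist_identification/whitebox/features.py | create_subsumed_ngram_mapping
-- ===== SOURCE A (Python) =====
-- def create_subsumed_ngram_mapping(ngrams) -> dict[list, list]:
--     def is_contiguous_sublist(smaller, larger):
--         if len(smaller) >= len(larger):
--             return False
--         m = len(smaller)
--         return any(larger[i:i + m] == smaller for i in range(len(larger) - m + 1))
--
--     mapping = {}
--     for item in ngrams:
--         key = tuple(item)
--         mapping[key] = [large for large in ngrams if is_contiguous_sublist(item, large)]
--
--     return mapping
-- ===== SOURCE B (Python) =====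
-- def create_subsumed_ngram_mapping(ngrams) -> dict[list, list]:
--     # One pass: index all ngrams, then for each ngram enumerate its distinct
--     # contiguous proper sublists -- only of lengths that actually occur among
--     # the ngrams -- and append it to each matching key's list.
--     mapping = {tuple(item): [] for item in ngrams}
--     lengths = {len(item) for item in ngrams}
--     for large in ngrams:
--         n = len(large)
--         subs = {tuple(large[i:i + m]) for m in lengths if m < n for i in range(n - m + 1)}
--         for sub in subs:
--             if sub in mapping:
--                 mapping[sub].append(large)
--     return mapping
-- ===== Notes on version B (the rewrite author's own statement) =====
-- stated objective: faster
-- what changed: Instead of testing every ngram against every other ngram with a sliding-window containment scan (all pairs), B indexes all ngrams in a dict once and, in a single pass, enumerates each ngram's distinct contiguous proper sublists of the lengths that actually occur among the ngrams, appending the ngram to each matching key's list.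
import Mathlib
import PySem

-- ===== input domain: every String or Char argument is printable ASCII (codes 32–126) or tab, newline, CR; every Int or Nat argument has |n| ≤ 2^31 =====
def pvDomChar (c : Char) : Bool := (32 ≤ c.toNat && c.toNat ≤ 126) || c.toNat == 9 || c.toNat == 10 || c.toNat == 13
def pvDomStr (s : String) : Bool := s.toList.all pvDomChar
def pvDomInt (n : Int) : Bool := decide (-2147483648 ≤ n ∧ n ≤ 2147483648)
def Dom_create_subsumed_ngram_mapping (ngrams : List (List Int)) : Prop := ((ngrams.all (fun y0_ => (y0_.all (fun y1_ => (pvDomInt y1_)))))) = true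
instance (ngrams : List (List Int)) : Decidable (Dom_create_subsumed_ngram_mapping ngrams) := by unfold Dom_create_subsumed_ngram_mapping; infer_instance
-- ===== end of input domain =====

-- B replaces A's all-pairs containment scan by indexing all ngrams once and enumerating
-- each ngram's distinct contiguous proper sublists (objective: faster).

-- ===== PORT A =====
def isContiguousSublist (smaller larger : List Int) : Bool :=
  if (smaller.length : Int) ≥ (larger.length : Int) then false
  else
    (PySem.List.pyRange 0 ((larger.length : Int) - (smaller.length : Int) + 1) 1).any
      (fun i => PySem.List.slice larger (some i) (some (i + (smaller.length : Int))) == smaller)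

def create_subsumed_ngram_mapping (ngrams : List (List Int)) : List (List Int × List (List Int)) :=
  (ngrams.foldl
    (fun mapping item =>
      mapping.insert item (ngrams.filter (fun large => isContiguousSublist item large)))
    (PySem.Dict.empty : PySem.Dict (List Int) (List (List Int)))).items

-- ===== PORT B =====
-- the set comprehension {tuple(large[i:i+m]) for m in lengths if m < n for i in range(n-m+1)}
def subsOf (lengths : List Int) (large : List Int) : PySem.Set (List Int) :=
  PySem.Set.ofList ((lengths.filter (fun m => m < (large.length : Int))).flatMap
    (fun m => (PySem.List.pyRange 0 ((large.length : Int) - m + 1) 1).map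
      (fun i => PySem.List.slice large (some i) (some (i + m)))))

def create_subsumed_ngram_mapping_alt (ngrams : List (List Int)) : List (List Int × List (List Int)) :=
  let init : PySem.Dict (List Int) (List (List Int)) :=
    ngrams.foldl (fun m item => m.insert item []) PySem.Dict.empty
  let lengths : PySem.Set Int :=
    PySem.Set.ofList (ngrams.map (fun item => (item.length : Int)))
  (ngrams.foldl
    (fun mapping large =>
      (subsOf lengths large).foldl
        (fun m sub => if m.contains sub then m.modify sub [] (· ++ [large]) else m)
        mapping)
    init).items

-- ===== PRECONDITION & SPEC =====
def Spec_create_subsumed_ngram_mapping (ngrams : List (List Int)) (out : List (List Int × List (List Int))) : Prop := out = create_subsumed_ngram_mapping_alt ngrams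
instance (ngrams : List (List Int)) (out : List (List Int × List (List Int))) : Decidable (Spec_create_subsumed_ngram_mapping ngrams out) := by unfold Spec_create_subsumed_ngram_mapping; infer_instance

-- ===== CLAIM (what is proved, stated in full; the proofs are below) =====
def Claim_equal_create_subsumed_ngram_mapping : Prop := ∀ (ngrams : List (List Int)), Dom_create_subsumed_ngram_mapping ngrams → Spec_create_subsumed_ngram_mapping ngrams (create_subsumed_ngram_mapping ngrams)

-- ===== LEMMAS AND PROOFS =====

-- length of a slice with in-range nonnegative bounds
theorem length_slice_inrange (l : List Int) (i m : Int) (hi : 0 ≤ i) (hm : 0 ≤ m)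
    (hb : i + m ≤ (l.length : Int)) :
    ((PySem.List.slice l (some i) (some (i + m))).length : Int) = m := by
  rw [PySem.List.slice_toNat l hi (by omega)]
  simp [List.length_take, List.length_drop]
  omega

-- the heart: for a key whose length occurs among the (nonnegative) candidate lengths,
-- A's containment test agrees with membership in B's sublist set
theorem isContig_iff_mem_subs (k l : List Int) (L : List Int)
    (hL : ∀ m ∈ L, 0 ≤ m) (hk : (k.length : Int) ∈ L) :
    isContiguousSublist k l = decide (k ∈ subsOf L l) := by
  have h : isContiguousSublist k l = true ↔ k ∈ subsOf L l := by
    unfold isContiguousSublist subsOf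
    rw [PySem.Set.mem_ofList]
    constructor
    · intro hc
      split at hc
      · exact absurd hc (by simp)
      · rename_i hlt
        rw [List.any_eq_true] at hc
        obtain ⟨i, hi, hslice⟩ := hc
        rw [List.mem_flatMap]
        refine ⟨(k.length : Int), ?_, ?_⟩
        · rw [List.mem_filter]
          exact ⟨hk, by simp; omega⟩
        · rw [List.mem_map]
          exact ⟨i, hi, by rw [beq_iff_eq] at hslice; exact hslice⟩
    · intro hmem
      rw [List.mem_flatMap] at hmem
      obtain ⟨m, hm, hmem⟩ := hmem
      rw [List.mem_map] at hmem
      obtain ⟨i, hi, hslice⟩ := hmem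
      rw [List.mem_filter] at hm
      have hm0 : 0 ≤ m := hL m hm.1
      have hmn : m < (l.length : Int) := by have := hm.2; simpa using this
      rw [PySem.List.mem_pyRange_one] at hi
      have hlen : (k.length : Int) = m := by
        rw [← hslice]
        exact length_slice_inrange l i m hi.1 hm0 (by omega)
      rw [if_neg (by omega)]
      rw [List.any_eq_true]
      refine ⟨i, ?_, ?_⟩
      · rw [PySem.List.mem_pyRange_one]; omega
      · rw [beq_iff_eq, hlen]; exact hslice
  simp only [← h, Bool.decide_coe]

-- A's fold inserts each key with a value depending only on the key; relative to the
-- same fold inserting a constant, the items are the key-indexed map.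
theorem foldl_insert_vfun (v : List Int → List (List Int)) (c : List (List Int))
    (l : List (List Int)) (d e : PySem.Dict (List Int) (List (List Int)))
    (h : e.items = d.items.map (fun p => (p.1, v p.1))) :
    (l.foldl (fun m k => m.insert k (v k)) e).items
      = (l.foldl (fun m k => m.insert k c) d).items.map (fun p => (p.1, v p.1)) := by
  induction l generalizing d e with
  | nil => simpa using h
  | cons a rest ih =>
    simp only [List.foldl_cons]
    apply ih
    have hcont : e.contains a = d.contains a := by
      simp [PySem.Dict.contains, h, List.any_map, Function.comp_def]
    cases hc : d.contains a with
    | false =>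
      rw [PySem.Dict.items_insert_of_not_contains e (v a) (hcont.trans hc),
          PySem.Dict.items_insert_of_not_contains d c hc]
      simp [h]
    | true =>
      rw [PySem.Dict.items_insert_of_contains e _ (hcont.trans hc),
          PySem.Dict.items_insert_of_contains d _ hc, h]
      simp only [List.map_map]
      apply List.map_congr_left
      intro p _
      by_cases hpk : p.1 = a <;> simp [Function.comp, hpk]

-- one guarded conditional-append step on a nodup-keyed dict, at the items level
theorem items_guarded_append (d : PySem.Dict (List Int) (List (List Int)))
    (sub : List Int) (x : List Int) (hnd : d.keys.Nodup) :
    (if d.contains sub then d.modify sub [] (· ++ [x]) else d).items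
      = d.items.map (fun p => (p.1, if p.1 = sub then p.2 ++ [x] else p.2)) := by
  cases hc : d.contains sub with
  | false =>
    have hall : ∀ p ∈ d.items, p.1 ≠ sub := by
      intro p hp
      simp only [PySem.Dict.contains, List.any_eq_false] at hc
      simpa using hc p hp
    rw [if_neg (by simp)]
    have hmap : List.map (fun p => ((p : List Int × List (List Int)).1, if p.1 = sub then p.2 ++ [x] else p.2)) d.items
        = List.map (fun p => p) d.items :=
      List.map_congr_left (fun p hp => by simp [hall p hp])
    rw [hmap, List.map_id']
  | true =>
    rw [if_pos rfl]
    simp only [PySem.Dict.modify]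
    rw [PySem.Dict.items_insert_of_contains d _ hc]
    apply List.map_congr_left
    intro p hp
    by_cases hpk : p.1 = sub
    · have : d.getD sub [] = p.2 := by
        have : (sub, p.2) ∈ d.items := by
          have := hp; rwa [show p = (sub, p.2) by rw [← hpk]] at this
        exact PySem.Dict.getD_of_mem_items d this hnd []
      simp [hpk, this]
    · simp [hpk]

-- the inner loop over a duplicate-free sub list appends x to exactly the keys in s
theorem items_inner_fold (s : List (List Int)) (x : List Int)
    (d : PySem.Dict (List Int) (List (List Int))) (hs : s.Nodup) (hnd : d.keys.Nodup) :
    (s.foldl (fun m sub => if m.contains sub then m.modify sub [] (· ++ [x]) else m) d).items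
      = d.items.map (fun p => (p.1, if p.1 ∈ s then p.2 ++ [x] else p.2)) := by
  induction s generalizing d with
  | nil => simp
  | cons sub rest ih =>
    simp only [List.foldl_cons]
    have hstep := items_guarded_append d sub x hnd
    have hkeys : (if d.contains sub then d.modify sub [] (· ++ [x]) else d).keys = d.keys := by
      simp [PySem.Dict.keys, hstep, List.map_map, Function.comp_def]
    rw [ih _ hs.of_cons (hkeys ▸ hnd), hstep]
    simp only [List.map_map]
    apply List.map_congr_left
    intro p _
    have hsubrest : sub ∉ rest := (List.nodup_cons.mp hs).1
    by_cases hpk : p.1 = sub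
    · simp [hpk, hsubrest]
    · simp [hpk]

-- the outer loop of B appends, to each key, the filtered list of containing ngrams
theorem items_outer_fold (L : List Int) (l : List (List Int))
    (d : PySem.Dict (List Int) (List (List Int))) (hnd : d.keys.Nodup) :
    (l.foldl (fun mapping large =>
        (subsOf L large).foldl
          (fun m sub => if m.contains sub then m.modify sub [] (· ++ [large]) else m)
          mapping) d).items
      = d.items.map (fun p => (p.1, p.2 ++ l.filter (fun large => decide (p.1 ∈ subsOf L large)))) := by
  induction l generalizing d with
  | nil => simp
  | cons a rest ih =>
    simp only [List.foldl_cons]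
    have hnodup_s : (subsOf L a).Nodup := PySem.Set.nodup_ofList _
    have hstep := items_inner_fold (subsOf L a) a d hnodup_s hnd
    have hkeys : ((subsOf L a).foldl
        (fun m sub => if m.contains sub then m.modify sub [] (· ++ [a]) else m) d).keys = d.keys := by
      simp [PySem.Dict.keys, hstep, List.map_map, Function.comp_def]
    rw [ih _ (hkeys ▸ hnd), hstep]
    simp only [List.map_map]
    apply List.map_congr_left
    intro p _
    by_cases hpa : p.1 ∈ subsOf L a
    · simp [hpa]
    · simp [hpa]

-- ===== VERDICT (by name: the statement is the Claim_ definition above) =====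
theorem create_subsumed_ngram_mapping_spec : Claim_equal_create_subsumed_ngram_mapping := by
  intro ngrams _
  have halt : create_subsumed_ngram_mapping_alt ngrams
      = (ngrams.foldl (fun mapping large =>
          (subsOf (PySem.Set.ofList (ngrams.map (fun item => (item.length : Int)))) large).foldl
            (fun m sub => if m.contains sub then m.modify sub [] (· ++ [large]) else m)
            mapping)
          (ngrams.foldl (fun m item => m.insert item []) PySem.Dict.empty)).items := rfl
  unfold Spec_create_subsumed_ngram_mapping create_subsumed_ngram_mapping
  rw [halt]
  have hnodup : (ngrams.foldl (fun m item => m.insert item []) (PySem.Dict.empty : PySem.Dict (List Int) (List (List Int)))).keys.Nodup :=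
    PySem.Dict.nodup_keys_foldl_insert ngrams (fun _ _ => []) PySem.Dict.empty PySem.Dict.nodup_keys_empty
  have hA : (ngrams.foldl (fun mapping item => mapping.insert item
        (ngrams.filter (fun large => isContiguousSublist item large)))
        (PySem.Dict.empty : PySem.Dict (List Int) (List (List Int)))).items
      = (ngrams.foldl (fun m item => m.insert item []) (PySem.Dict.empty : PySem.Dict (List Int) (List (List Int)))).items.map
          (fun p => (p.1, ngrams.filter (fun large => isContiguousSublist p.1 large))) :=
    foldl_insert_vfun (fun k => ngrams.filter (fun large => isContiguousSublist k large)) []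
      ngrams PySem.Dict.empty PySem.Dict.empty (by rfl)
  have hinit : (ngrams.foldl (fun m item => m.insert item []) (PySem.Dict.empty : PySem.Dict (List Int) (List (List Int)))).items
      = (ngrams.foldl (fun m item => m.insert item []) (PySem.Dict.empty : PySem.Dict (List Int) (List (List Int)))).items.map
          (fun p => (p.1, ([] : List (List Int)))) :=
    foldl_insert_vfun (fun _ => []) [] ngrams PySem.Dict.empty PySem.Dict.empty (by rfl)
  rw [hA, items_outer_fold _ ngrams _ hnodup]
  conv_rhs => rw [hinit]
  simp only [List.map_map]
  apply List.map_congr_left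
  intro p hp
  have hpk : p.1 ∈ ngrams := by
    have hkeys : (ngrams.foldl (fun m item => m.insert item [])
        (PySem.Dict.empty : PySem.Dict (List Int) (List (List Int)))).keys
        = PySem.Set.update PySem.Dict.empty.keys ngrams :=
      PySem.Dict.keys_foldl_insert ngrams (fun _ _ => []) PySem.Dict.empty
    have hmemk : p.1 ∈ (ngrams.foldl (fun m item => m.insert item [])
        (PySem.Dict.empty : PySem.Dict (List Int) (List (List Int)))).keys :=
      List.mem_map.mpr ⟨p, hp, rfl⟩
    rw [hkeys] at hmemk
    have : p.1 ∈ PySem.Set.ofList ngrams := by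
      simpa [PySem.Set.update, PySem.Set.ofList_eq_foldl, PySem.Dict.keys] using hmemk
    exact (PySem.Set.mem_ofList ngrams p.1).mp this
  have hL : ∀ m ∈ PySem.Set.ofList (ngrams.map (fun item => (item.length : Int))), (0:Int) ≤ m := by
    intro m hm
    rw [PySem.Set.mem_ofList] at hm
    obtain ⟨it, _, rfl⟩ := List.mem_map.mp hm
    positivity
  have hk : ((p.1.length : Int)) ∈ PySem.Set.ofList (ngrams.map (fun item => (item.length : Int))) :=
    (PySem.Set.mem_ofList _ _).mpr (List.mem_map.mpr ⟨p.1, hpk, rfl⟩)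
  simp [isContig_iff_mem_subs p.1 _ _ hL hk]
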